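-- pv_equiv track=rewrite | github.com/alskaf1293/neuralcomputer | python_rtl/cartpole_pendulum.py | layer_dims
-- ===== SOURCE A (Python) =====
-- from typing import Sequence
--
-- def layer_dims(k_lut: Sequence[int], m0: int = 0) -> list[tuple[int, int, int]]:
--     nl = len(k_lut)
--     out = []
--     for ul in range(nl):
--         k = k_lut[ul]
--         n = k_lut[0] if nl == 1 else (k_lut[nl-2] if ul == nl-1 else k_lut[ul+1])
--         m = m0 if ul == 0 else k_lut[ul-1]
--         out.append((k, n, m))
--     return out
-- ===== SOURCE B (Python) =====
-- def layer_dims(k_lut, m0=0):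
--     rev = list(k_lut)[::-1]
--     if not rev:
--         return []
--     out = []
--     nxt = rev[1] if len(rev) > 1 else rev[0]
--     for k, m in zip(rev, rev[1:] + [m0]):
--         out.append((k, nxt, m))
--         nxt = k
--     out.reverse()
--     return out
-- ===== Notes on version B (the rewrite author's own statement) =====
-- stated objective: alternative
-- what changed: B replaces A's forward indexed loop with per-element index arithmetic by a reverse traversal that carries the successor in an accumulator (zipping in the predecessor), builds the output back-to-front and reverses it once at the end.
import Mathlib
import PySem

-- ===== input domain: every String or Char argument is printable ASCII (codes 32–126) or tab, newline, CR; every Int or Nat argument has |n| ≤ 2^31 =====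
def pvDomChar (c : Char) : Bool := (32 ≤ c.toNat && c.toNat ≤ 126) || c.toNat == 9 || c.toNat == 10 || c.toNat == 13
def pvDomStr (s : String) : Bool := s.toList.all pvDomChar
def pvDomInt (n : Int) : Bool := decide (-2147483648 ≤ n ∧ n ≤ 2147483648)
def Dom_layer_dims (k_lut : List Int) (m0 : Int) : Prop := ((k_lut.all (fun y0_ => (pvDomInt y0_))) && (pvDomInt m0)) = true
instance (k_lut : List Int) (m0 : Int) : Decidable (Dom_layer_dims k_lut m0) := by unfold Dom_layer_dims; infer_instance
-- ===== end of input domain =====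

-- B traverses the list in REVERSE with a carried-successor accumulator (no index arithmetic),
-- building the output back-to-front and reversing once at the end; alternative decomposition, same cost.

-- ===== PORT A =====
def layer_dims (k_lut : List Int) (m0 : Int) : List (Int × Int × Int) :=
  let nl : Int := k_lut.length
  (PySem.List.pyRange 0 nl 1).foldl (fun out ul =>
    let k := PySem.List.pyGetD k_lut ul 0
    let n := if nl = 1 then PySem.List.pyGetD k_lut 0 0
             else if ul = nl - 1 then PySem.List.pyGetD k_lut (nl - 2) 0
             else PySem.List.pyGetD k_lut (ul + 1) 0
    let m := if ul = 0 then m0 else PySem.List.pyGetD k_lut (ul - 1) 0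
    out ++ [(k, n, m)]) []

-- ===== PORT B =====
-- rev = list(k_lut)[::-1] is reversal (PySem.List.slice?_none_none_neg_one); rev[1] / rev[0] are
-- guarded in range so pyGetD is exact; the for-loop over zip(rev, rev[1:] + [m0]) with the (out, nxt)
-- state is the foldl; out.reverse() is .reverse.
def layer_dims_alt (k_lut : List Int) (m0 : Int) : List (Int × Int × Int) :=
  let rev := k_lut.reverse
  if rev = [] then []
  else
    let nxt0 := if 1 < rev.length then PySem.List.pyGetD rev 1 0 else PySem.List.pyGetD rev 0 0
    let st := (rev.zip (PySem.List.slice rev (some 1) none ++ [m0])).foldl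
        (fun (st : List (Int × Int × Int) × Int) km => (st.1 ++ [(km.1, st.2, km.2)], km.1))
        ([], nxt0)
    st.1.reverse

-- ===== PRECONDITION & SPEC =====
def Spec_layer_dims (k_lut : List Int) (m0 : Int) (out : List (Int × Int × Int)) : Prop := out = layer_dims_alt k_lut m0
instance (k_lut : List Int) (m0 : Int) (out : List (Int × Int × Int)) : Decidable (Spec_layer_dims k_lut m0 out) := by unfold Spec_layer_dims; infer_instance

-- ===== CLAIM (what is proved, stated in full; the proofs are below) =====
def Claim_equal_layer_dims : Prop := ∀ (k_lut : List Int) (m0 : Int), Dom_layer_dims k_lut m0 → Spec_layer_dims k_lut m0 (layer_dims k_lut m0)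

-- ===== LEMMAS AND PROOFS =====

-- the chained-accumulator loop body of B, written as a structural recursion (proof helper)
def pvEmit (nxt : Int) (zs : List (Int × Int)) : List (Int × Int × Int) :=
  match zs with
  | [] => []
  | (k, m) :: rest => (k, nxt, m) :: pvEmit k rest

theorem foldl_eq_pvEmit (zs : List (Int × Int)) :
    ∀ (acc : List (Int × Int × Int)) (nxt : Int),
    (zs.foldl (fun (st : List (Int × Int × Int) × Int) km => (st.1 ++ [(km.1, st.2, km.2)], km.1))
      (acc, nxt)).1 = acc ++ pvEmit nxt zs := by
  induction zs with
  | nil => intro acc nxt; simp [pvEmit]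
  | cons z rest ih =>
    intro acc nxt
    obtain ⟨k, m⟩ := z
    simp only [List.foldl_cons, pvEmit]
    rw [ih]
    simp

theorem length_pvEmit (zs : List (Int × Int)) : ∀ nxt, (pvEmit nxt zs).length = zs.length := by
  induction zs with
  | nil => intro _; rfl
  | cons z rest ih => intro nxt; obtain ⟨k, m⟩ := z; simp [pvEmit, ih]

theorem getElem_pvEmit (zs : List (Int × Int)) :
    ∀ (nxt : Int) (j : Nat) (h : j < zs.length),
    (pvEmit nxt zs)[j]'(by rw [length_pvEmit]; exact h) =
      ((zs[j]'h).1, if j = 0 then nxt else (zs.getD (j-1) (0,0)).1, (zs[j]'h).2) := by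
  induction zs with
  | nil => intro _ j h; simp at h
  | cons z rest ih =>
    intro nxt j h
    obtain ⟨k, m⟩ := z
    match j with
    | 0 => simp [pvEmit]
    | j + 1 =>
      simp only [pvEmit, List.getElem_cons_succ]
      rw [ih k j (by simpa using h)]
      match j with
      | 0 => simp
      | j + 1 => simp

theorem layer_dims_eq_map (k_lut : List Int) (m0 : Int) :
    layer_dims k_lut m0 =
    (PySem.List.pyRange 0 (k_lut.length : Int) 1).map (fun ul =>
      (PySem.List.pyGetD k_lut ul 0,
       (if (k_lut.length : Int) = 1 then PySem.List.pyGetD k_lut 0 0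
        else if ul = (k_lut.length : Int) - 1 then PySem.List.pyGetD k_lut ((k_lut.length : Int) - 2) 0
        else PySem.List.pyGetD k_lut (ul + 1) 0),
       (if ul = 0 then m0 else PySem.List.pyGetD k_lut (ul - 1) 0))) := by
  simp only [layer_dims]
  rw [PySem.List.foldl_append_singleton_eq_map]
  simp

-- ===== VERDICT (by name: the statement is the Claim_ definition above) =====
theorem layer_dims_spec : Claim_equal_layer_dims := by
  intro ks m0 _
  show layer_dims ks m0 = layer_dims_alt ks m0
  rw [layer_dims_eq_map]
  match ks with
  | [] => simp [layer_dims_alt, PySem.List.pyRange_one_eq_nil]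
  | [a] =>
    have h1 : PySem.List.pyRange 0 ((List.length [a] : Nat) : Int) 1 = [0] := by
      simpa using PySem.List.pyRange_one_singleton (a := 0)
    rw [h1]
    simp [layer_dims_alt, PySem.List.slice_from_one]
  | a :: b :: t =>
    set ks := a :: b :: t with hks
    have hlen2 : 2 ≤ ks.length := by simp [hks]
    clear_value ks
    clear hks
    simp only [layer_dims_alt, PySem.List.slice_from_one]
    rw [if_neg (by simp only [List.reverse_eq_nil_iff]; rintro rfl; simp at hlen2)]
    rw [foldl_eq_pvEmit, List.nil_append]
    have hzslen : (ks.reverse.zip (ks.reverse.tail ++ [m0])).length = ks.length := by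
      simp [List.length_zip]; omega
    apply List.ext_getElem
    · simp only [List.length_map, PySem.List.length_pyRange_one, List.length_reverse,
        length_pvEmit, hzslen]
      omega
    · intro i h1 h2
      have hi : i < ks.length := by
        simpa [PySem.List.length_pyRange_one] using h1
      rw [List.getElem_map, PySem.List.getElem_pyRange_one]
      rw [List.getElem_reverse]
      have hidx : (pvEmit (if 1 < ks.reverse.length then PySem.List.pyGetD ks.reverse 1 0
                           else PySem.List.pyGetD ks.reverse 0 0)
                    (ks.reverse.zip (ks.reverse.tail ++ [m0]))).length - 1 - i
                  = ks.length - 1 - i := by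
        rw [length_pvEmit, hzslen]
      simp only [hidx]
      rw [getElem_pvEmit _ _ (ks.length - 1 - i) (by omega)]
      simp only [zero_add, List.getElem_zip]
      simp only [Prod.mk.injEq]
      refine ⟨?_, ?_, ?_⟩
      · -- first component
        simp only [List.getElem_reverse]
        rw [PySem.List.pyGetD_natCast, List.getD_eq_getElem _ _ hi]
        congr 1
        omega
      · -- second component (n)
        rw [if_neg (by omega : ¬ (ks.length : Int) = 1)]
        by_cases hlast : i = ks.length - 1
        · -- last original element: n = rev[1] = ks[len-2]
          rw [if_pos (by omega : (i : Int) = (ks.length : Int) - 1),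
              if_pos (by omega : ks.length - 1 - i = 0),
              if_pos (by simp; omega : 1 < ks.reverse.length)]
          have h2' : ((ks.length : Int) - 2) = ((ks.length - 2 : Nat) : Int) := by omega
          rw [h2', PySem.List.pyGetD_natCast, PySem.List.pyGetD_ofNat']
          rw [List.getD_eq_getElem _ _ (by omega : ks.length - 2 < ks.length),
              List.getD_eq_getElem _ _ (by simp; omega : 1 < ks.reverse.length)]
          rw [List.getElem_reverse]
          congr 1
        · -- interior: n = rev[(len-1-i)-1] = ks[i+1]
          rw [if_neg (by omega : ¬ (i : Int) = (ks.length : Int) - 1),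
              if_neg (by omega : ¬ ks.length - 1 - i = 0)]
          rw [List.getD_eq_getElem _ _ (by rw [hzslen]; omega)]
          simp only [List.getElem_zip, List.getElem_reverse]
          have hcast : ((i : Int) + 1) = ((i + 1 : Nat) : Int) := by omega
          rw [hcast, PySem.List.pyGetD_natCast,
              List.getD_eq_getElem _ _ (by omega : i + 1 < ks.length)]
          congr 1
          omega
      · -- third component (m)
        by_cases hi0 : i = 0
        · rw [if_pos (by omega : (i : Int) = 0)]
          have hge : ks.reverse.tail.length ≤ ks.length - 1 - i := by simp; omega
          rw [List.getElem_append_right hge]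
          simp
        · rw [if_neg (by omega : ¬ (i : Int) = 0)]
          have hlt : ks.length - 1 - i < ks.reverse.tail.length := by simp; omega
          rw [List.getElem_append_left hlt, List.getElem_tail]
          simp only [List.getElem_reverse]
          have hcast : ((i : Int) - 1) = ((i - 1 : Nat) : Int) := by omega
          rw [hcast, PySem.List.pyGetD_natCast,
              List.getD_eq_getElem _ _ (by omega : i - 1 < ks.length)]
          congr 1
          omega
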